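-- pv_equiv track=rewrite | github.com/EzadAffandi/Pythonnnn | parser.py | statsReponse
-- ===== SOURCE A (Python) =====
-- def statsReponse(data):
-- 	ok=0
-- 	error=0
-- 	for i in data:
-- 		if i['response']=='200':
-- 			ok=ok+1
-- 		if i['response']=='404':
-- 			error=error+1
-- 	return dict(ok=ok,error=error)
-- ===== SOURCE B (Python) =====
-- def statsReponse(data):
--     responses = [i['response'] for i in data]
--     return {'ok': responses.count('200'), 'error': responses.count('404')}
-- ===== Notes on version B (the rewrite author's own statement) =====
-- stated objective: idiomatic
-- what changed: B replaces A's single accumulator loop with two per-item if branches by staged passes: it projects the response column into a list, then answers with two library list.count scans, with no conditionals or counters of its own.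
import Mathlib
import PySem

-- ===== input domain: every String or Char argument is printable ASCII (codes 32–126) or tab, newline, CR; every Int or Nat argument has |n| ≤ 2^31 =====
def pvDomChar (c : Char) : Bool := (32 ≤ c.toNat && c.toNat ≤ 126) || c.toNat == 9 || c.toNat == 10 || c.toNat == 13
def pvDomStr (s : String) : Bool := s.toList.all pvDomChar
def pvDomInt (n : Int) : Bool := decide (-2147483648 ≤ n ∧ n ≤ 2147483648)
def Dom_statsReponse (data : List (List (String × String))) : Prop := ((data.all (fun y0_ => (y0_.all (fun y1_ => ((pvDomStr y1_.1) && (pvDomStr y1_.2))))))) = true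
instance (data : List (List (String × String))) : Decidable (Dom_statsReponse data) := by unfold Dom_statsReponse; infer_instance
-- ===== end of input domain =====

-- B replaces A's single branching accumulator loop by staged passes: project the response column, then two library count scans; same O(n) cost, more idiomatic.


-- ===== PORT A =====
-- i['response'] : first-match lookup in the association list (default "" is only
-- reached outside Pre_statsReponse, where the Python raises KeyError)
def pvResp (i : List (String × String)) : String :=
  ((i.find? (fun p => p.1 == "response")).map (·.2)).getD ""

def statsReponse (data : List (List (String × String))) : List (String × Int) :=
  let st := data.foldl (fun (p : Int × Int) i =>
    let ok := if pvResp i = "200" then p.1 + 1 else p.1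
    let error := if pvResp i = "404" then p.2 + 1 else p.2
    (ok, error)) (0, 0)
  [("ok", st.1), ("error", st.2)]

-- ===== PORT B =====
def statsReponse_alt (data : List (List (String × String))) : List (String × Int) :=
  let responses := data.map pvResp
  [("ok", (PySem.List.count responses "200" : Int)),
   ("error", (PySem.List.count responses "404" : Int))]

-- ===== PRECONDITION & SPEC =====
-- Pre_ excludes records without a 'response' key, on which A raises KeyError.
def Pre_statsReponse (data : List (List (String × String))) : Prop :=
  (data.all (fun i => i.any (fun p => p.1 == "response"))) = true
instance (data : List (List (String × String))) : Decidable (Pre_statsReponse data) := by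
  unfold Pre_statsReponse; infer_instance

def pvWitness_statsReponse : (List (List (String × String))) :=
  [[("response", "200")], [("response", "404"), ("url", "/")], [("response", "500")]]

def Spec_statsReponse (data : List (List (String × String))) (out : List (String × Int)) : Prop := out = statsReponse_alt data
instance (data : List (List (String × String))) (out : List (String × Int)) : Decidable (Spec_statsReponse data out) := by unfold Spec_statsReponse; infer_instance

-- ===== CLAIM (what is proved, stated in full; the proofs are below) =====
def Claim_equal_statsReponse : Prop := ∀ (data : List (List (String × String))), Dom_statsReponse data → Pre_statsReponse data → Spec_statsReponse data (statsReponse data)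

-- ===== LEMMAS AND PROOFS =====
theorem pv_foldA (data : List (List (String × String))) :
    ∀ (a b : Int),
      data.foldl (fun (p : Int × Int) i =>
        let ok := if pvResp i = "200" then p.1 + 1 else p.1
        let error := if pvResp i = "404" then p.2 + 1 else p.2
        (ok, error)) (a, b)
      = (a + ((data.map pvResp).count "200" : Int),
         b + ((data.map pvResp).count "404" : Int)) := by
  induction data with
  | nil => simp
  | cons i t ih =>
    intro a b
    simp only [List.foldl_cons, List.map_cons, ih]
    rw [List.count_cons, List.count_cons]
    by_cases h2 : pvResp i = "200" <;> by_cases h4 : pvResp i = "404" <;>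
      simp [h2, h4] <;> ring

-- ===== VERDICT (by name: the statement is the Claim_ definition above) =====
theorem statsReponse_spec : Claim_equal_statsReponse := by
  intro data _ _
  show statsReponse data = statsReponse_alt data
  simp only [statsReponse, statsReponse_alt, pv_foldA, PySem.List.count_eq]
  norm_num
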